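-- pv_equiv track=rewrite | github.com/NobleMathews/FuzzSliceICSE | main.py | fix_attribute_srcml_parse
-- ===== SOURCE A (Python) =====
-- def fix_attribute_srcml_parse(s):
--     if "__attribute__" in s:
--         ret = ""
--         skip = 0
--         find_pattern = 0
--         seq_found = 0
--         for i in range(len(s)):
--             c = s[i]
--             if i + 13 < len(s) and s[i : i + 13] == "__attribute__":
--                 find_pattern = 1
--                 seq_found = 0
--             if find_pattern == 1:
--                 if c == "(":
--                     skip += 1
--                     seq_found = 1
--                     continue
--                 elif c == ")" and skip > 0:
--                     skip -= 1
--                     continue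
--                 elif skip == 0 and seq_found == 1:
--                     find_pattern = 0
--                 else:
--                     continue
--             ret = ret + c
--         return ret
--     return s
-- ===== SOURCE B (Python) =====
-- def fix_attribute_srcml_parse(s):
--     if "__attribute__" not in s:
--         return s
--     out = []
--     pos = 0
--     n = len(s)
--     while True:
--         j = s.find("__attribute__", pos)
--         if j == -1 or not (j + 13 < n):
--             out.append(s[pos:])
--             break
--         out.append(s[pos:j])
--         # consume the attribute region: skip to past its balanced parens
--         k = j
--         skip = 0
--         seq = False
--         while k < n:
--             if k + 13 < n and s[k:k + 13] == "__attribute__":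
--                 seq = False
--             c = s[k]
--             if c == "(":
--                 skip += 1
--                 seq = True
--                 k += 1
--             elif c == ")" and skip > 0:
--                 skip -= 1
--                 k += 1
--             elif skip == 0 and seq:
--                 break
--             else:
--                 k += 1
--         pos = k
--     return "".join(out)
-- ===== Notes on version B (the rewrite author's own statement) =====
-- stated objective: alternative
-- what changed: Replaces A's per-character state machine that rebuilds the whole string char by char (with quadratic ret = ret + c concatenation) by a find-and-skip scanner: jump with str.find to the next __attribute__, copy the clean segment wholesale, consume the balanced-paren region with a small counter loop, and join the segments.
import Mathlib
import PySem

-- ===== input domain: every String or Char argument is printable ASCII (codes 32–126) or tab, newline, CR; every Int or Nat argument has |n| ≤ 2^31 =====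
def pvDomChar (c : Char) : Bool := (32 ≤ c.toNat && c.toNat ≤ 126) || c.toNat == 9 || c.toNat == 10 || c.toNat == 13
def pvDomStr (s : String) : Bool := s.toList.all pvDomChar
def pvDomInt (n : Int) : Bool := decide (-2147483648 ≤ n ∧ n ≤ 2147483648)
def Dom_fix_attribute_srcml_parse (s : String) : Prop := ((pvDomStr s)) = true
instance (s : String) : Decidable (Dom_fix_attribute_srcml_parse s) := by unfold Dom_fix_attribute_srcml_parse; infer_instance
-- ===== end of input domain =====

-- B replaces A's per-character state machine (which rebuilds the whole string one char at a
-- time) by a find-and-skip segment scanner: jump to the next "__attribute__", copy the clean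
-- segment wholesale, consume the balanced-paren region, repeat (objective: simpler/faster scan).

-- the literal "__attribute__" pattern
def pvKw : List Char := "__attribute__".toList

-- Python's `i + 13 < len(s) and s[i:i+13] == "__attribute__"` test, on the suffix at i
def pvIsKw (t : List Char) : Bool := decide (13 < t.length) && pvKw.isPrefixOf t

-- ===== PORT A =====
-- A's for-loop, as recursion over the suffix of s; state (skip, find_pattern, seq_found)
def pvALoop : List Char → Nat → Bool → Bool → List Char
  | [], _, _, _ => []
  | c :: rest, skip, fp, seq =>
    let seq1 := if pvIsKw (c :: rest) then false else seq
    let fp1  := if pvIsKw (c :: rest) then true else fp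
    if fp1 then
      if c = '(' then pvALoop rest (skip + 1) fp1 true
      else if c = ')' ∧ 0 < skip then pvALoop rest (skip - 1) fp1 seq1
      else if skip = 0 ∧ seq1 = true then c :: pvALoop rest skip false seq1
      else pvALoop rest skip fp1 seq1
    else c :: pvALoop rest skip fp1 seq1

def fix_attribute_srcml_parse (s : String) : String :=
  if PySem.Str.isIn "__attribute__" s then String.mk (pvALoop s.toList 0 false false) else s

-- ===== PORT B =====
-- Source B's `s.find("__attribute__", pos)` with its `j + 13 < n` guard fused in: index of the
-- first guard-passing occurrence (exact: a guard-failing occurrence is necessarily the last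
-- possible start, so Source B appends the rest and stops precisely when this returns none)
def pvFindKw : List Char → Option Nat
  | [] => none
  | c :: rest => if pvIsKw (c :: rest) then some 0 else (pvFindKw rest).map (· + 1)

-- Source B's inner while-loop: drop the attribute region, return the suffix where it breaks
def pvConsume : List Char → Nat → Bool → List Char
  | [], _, _ => []
  | c :: rest, skip, seq =>
    let seq1 := if pvIsKw (c :: rest) then false else seq
    if c = '(' then pvConsume rest (skip + 1) true
    else if c = ')' ∧ 0 < skip then pvConsume rest (skip - 1) seq1
    else if skip = 0 ∧ seq1 = true then c :: rest
    else pvConsume rest skip seq1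

theorem pvConsume_len_le : ∀ (t : List Char) (skip : Nat) (seq : Bool),
    (pvConsume t skip seq).length ≤ t.length := by
  intro t
  induction t with
  | nil => intro skip seq; simp [pvConsume]
  | cons c rest ih =>
    intro skip seq
    simp only [pvConsume]
    split_ifs <;> first | exact Nat.le_succ_of_le (ih _ _) | simp

theorem pvConsume_kw_len : ∀ (t : List Char) (skip : Nat),
    pvIsKw t = true → (pvConsume t skip false).length < t.length := by
  intro t skip h
  match t with
  | [] => simp [pvIsKw] at h
  | c :: rest =>
    simp only [pvConsume, h, if_true]
    split_ifs <;> simp_all <;> exact pvConsume_len_le _ _ _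

theorem pvFindKw_spec : ∀ (t : List Char) (j : Nat),
    pvFindKw t = some j → j < t.length ∧ pvIsKw (t.drop j) = true := by
  intro t
  induction t with
  | nil => intro j h; simp [pvFindKw] at h
  | cons c rest ih =>
    intro j h
    simp only [pvFindKw] at h
    split_ifs at h with hk
    · cases h; exact ⟨Nat.succ_pos _, by simpa using hk⟩
    · simp only [Option.map_eq_some_iff] at h
      obtain ⟨j0, hj0, hj⟩ := h
      subst hj
      have h2 := ih j0 hj0
      exact ⟨by simpa using Nat.succ_lt_succ h2.1, by simpa using h2.2⟩

-- Source B's outer while-loop over `pos`, expressed on suffixes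
def pvBScan (t : List Char) : List Char :=
  match hf : pvFindKw t with
  | none => t
  | some j => t.take j ++ pvBScan (pvConsume (t.drop j) 0 false)
termination_by t.length
decreasing_by
  have h1 := pvFindKw_spec t j hf
  have h2 := pvConsume_kw_len (t.drop j) 0 h1.2
  have h3 : (t.drop j).length = t.length - j := by simp
  omega

def fix_attribute_srcml_parse_alt (s : String) : String :=
  if PySem.Str.isIn "__attribute__" s then String.mk (pvBScan s.toList) else s

-- ===== PRECONDITION & SPEC =====
def Spec_fix_attribute_srcml_parse (s : String) (out : String) : Prop := out = fix_attribute_srcml_parse_alt s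
instance (s : String) (out : String) : Decidable (Spec_fix_attribute_srcml_parse s out) := by unfold Spec_fix_attribute_srcml_parse; infer_instance

-- ===== CLAIM (what is proved, stated in full; the proofs are below) =====
def Claim_equal_fix_attribute_srcml_parse : Prop := ∀ (s : String), Dom_fix_attribute_srcml_parse s → Spec_fix_attribute_srcml_parse s (fix_attribute_srcml_parse s)

-- ===== LEMMAS AND PROOFS =====

theorem pvBScan_none {t : List Char} (h : pvFindKw t = none) : pvBScan t = t := by
  rw [pvBScan]; split <;> simp_all

theorem pvBScan_some {t : List Char} {j : Nat} (h : pvFindKw t = some j) :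
    pvBScan t = t.take j ++ pvBScan (pvConsume (t.drop j) 0 false) := by
  rw [pvBScan]; split <;> simp_all

-- no guard-passing occurrence: A's loop keeps every character
theorem pvALoop_none : ∀ (t : List Char) (seq : Bool),
    pvFindKw t = none → pvALoop t 0 false seq = t := by
  intro t
  induction t with
  | nil => intro seq _; simp [pvALoop]
  | cons c rest ih =>
    intro seq h
    simp only [pvFindKw] at h
    split_ifs at h with hk
    · have h2 : pvFindKw rest = none := by
        cases hf : pvFindKw rest <;> simp [hf] at h ⊢
      simp [pvALoop, hk, ih seq h2]

-- clean prefix before the first occurrence is copied through unchanged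
theorem pvALoop_prefix : ∀ (t : List Char) (j : Nat) (seq : Bool),
    pvFindKw t = some j →
    pvALoop t 0 false seq = t.take j ++ pvALoop (t.drop j) 0 false seq := by
  intro t
  induction t with
  | nil => intro j seq h; simp [pvFindKw] at h
  | cons c rest ih =>
    intro j seq h
    simp only [pvFindKw] at h
    split_ifs at h with hk
    · cases h; simp
    · match j, h with
      | 0, h =>
        exact absurd h (by cases hf : pvFindKw rest <;> simp [hf])
      | j' + 1, h =>
        have hj0 : pvFindKw rest = some j' := by
          cases hf : pvFindKw rest <;> simp [hf] at h ⊢; omega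
        simp [pvALoop, hk, ih j' seq hj0]

-- from inside a region (find_pattern = 1), A's loop drops exactly what pvConsume drops
theorem pvALoop_region : ∀ (t : List Char) (skip : Nat) (seq : Bool),
    pvALoop t skip true seq = pvALoop (pvConsume t skip seq) 0 false true := by
  intro t
  induction t with
  | nil => intro skip seq; simp [pvALoop, pvConsume]
  | cons c rest ih =>
    intro skip seq
    cases hk : pvIsKw (c :: rest) <;> cases seq <;>
      simp only [pvALoop, pvConsume, hk, Bool.false_eq_true, if_false, if_true, ite_self,
        ite_true, ite_false] <;>
      split_ifs <;>
      first
        | exact ih _ _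
        | simp_all [pvALoop, hk]

-- at a guard-passing occurrence the incoming seq value is irrelevant
theorem pvALoop_kw_head : ∀ (t : List Char) (seq : Bool), pvIsKw t = true →
    pvALoop t 0 false seq = pvALoop t 0 true false := by
  intro t seq h
  match t with
  | [] => simp [pvIsKw] at h
  | c :: rest => simp only [pvALoop, h, if_true]

-- main: A's one-pass state machine equals B's find-and-skip scanner
theorem pvMain : ∀ (n : Nat) (t : List Char), t.length ≤ n → ∀ (seq : Bool),
    pvALoop t 0 false seq = pvBScan t := by
  intro n
  induction n with
  | zero =>
    intro t ht seq
    have : t = [] := List.length_eq_zero_iff.mp (Nat.le_zero.mp ht)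
    subst this
    rw [pvBScan_none (by simp [pvFindKw])]
    simp [pvALoop]
  | succ m ih =>
    intro t ht seq
    cases hf : pvFindKw t with
    | none => rw [pvBScan_none hf, pvALoop_none t seq hf]
    | some j =>
      have hs := pvFindKw_spec t j hf
      rw [pvBScan_some hf, pvALoop_prefix t j seq hf,
          pvALoop_kw_head (t.drop j) seq hs.2, pvALoop_region (t.drop j) 0 false]
      congr 1
      apply ih
      have h2 := pvConsume_kw_len (t.drop j) 0 hs.2
      have h3 : (t.drop j).length = t.length - j := by simp
      omega

-- ===== VERDICT (by name: the statement is the Claim_ definition above) =====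
theorem fix_attribute_srcml_parse_spec : Claim_equal_fix_attribute_srcml_parse := by
  intro s _
  unfold Spec_fix_attribute_srcml_parse fix_attribute_srcml_parse fix_attribute_srcml_parse_alt
  split_ifs with h
  · rw [pvMain s.toList.length s.toList le_rfl false]
  · rfl
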